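-- pv_equiv track=rewrite | github.com/sheryllan/Algo | Sorting/find_the_largest_k_elements.py | find_largest_k_elements
-- ===== SOURCE A (Python) =====
-- from typing import List
--
-- def partition(nums: List[int], low: int, high: int) -> int:
--     pivot = nums[high]
--     i = low
--
--     for j in range(low, high + 1):
--         if nums[j] < pivot:
--             nums[i], nums[j] = nums[j], nums[i]
--             i += 1
--
--     nums[i], nums[high] = pivot, nums[i]
--     return i
--
-- def find_largest_k_elements(nums: List[int], k):
--     nums_unique = list(set(nums))
--     n = len(nums_unique)
--     i_intended = n - k
--     if i_intended <= 0:
--         return nums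
--
--     i_pivot = None
--     low, high = 0, n - 1
--
--     while i_pivot != i_intended:
--         i_pivot = partition(nums_unique, low, high)
--         if i_pivot < i_intended:
--             low = i_pivot + 1
--
--         elif i_pivot > i_intended:
--             high = i_pivot - 1
--
--     return [x for x in nums if x >= nums_unique[i_pivot]]
-- ===== SOURCE B (Python) =====
-- from typing import List
--
-- def find_largest_k_elements(nums: List[int], k):
--     unique_sorted = sorted(set(nums))
--     i = len(unique_sorted) - k
--     if i <= 0:
--         return nums
--     threshold = unique_sorted[i]
--     return [x for x in nums if x >= threshold]
-- ===== Notes on version B (the rewrite author's own statement) =====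
-- stated objective: simpler
-- what changed: Replaced the in-place quickselect (Lomuto partition loop driven by a while search for the target index) with a full sort of the unique values and a direct index into the sorted list to obtain the threshold; the final filter over nums is unchanged.
import Mathlib
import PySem

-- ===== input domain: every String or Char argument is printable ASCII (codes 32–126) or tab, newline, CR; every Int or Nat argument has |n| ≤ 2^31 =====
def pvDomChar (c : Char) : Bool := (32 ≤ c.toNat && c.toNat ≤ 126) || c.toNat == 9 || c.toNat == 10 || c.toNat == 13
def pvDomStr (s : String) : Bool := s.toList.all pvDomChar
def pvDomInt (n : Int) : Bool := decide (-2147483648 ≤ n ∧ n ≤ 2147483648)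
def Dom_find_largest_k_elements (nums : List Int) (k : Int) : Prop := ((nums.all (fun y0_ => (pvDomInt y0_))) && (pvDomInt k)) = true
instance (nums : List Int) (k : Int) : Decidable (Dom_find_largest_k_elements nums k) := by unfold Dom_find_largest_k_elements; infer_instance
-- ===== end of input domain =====

-- B replaces A's in-place quickselect over the unique values by sorting the unique values and
-- indexing the sorted list directly (objective: simpler); the final filter over nums is unchanged.

-- ===== PORT A =====
-- Lomuto partition: `nums[i], nums[j] = nums[j], nums[i]` becomes two pySetD writes whose
-- right-hand sides read the pre-assignment state, as in Python's simultaneous assignment.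
def pvPartStep (pivot : Int) (st : List Int × Int) (j : Int) : List Int × Int :=
  if PySem.List.pyGetD st.1 j 0 < pivot then
    (PySem.List.pySetD (PySem.List.pySetD st.1 st.2 (PySem.List.pyGetD st.1 j 0)) j
       (PySem.List.pyGetD st.1 st.2 0), st.2 + 1)
  else st

def pvPartition (nums : List Int) (low high : Int) : List Int × Int :=
  let pivot := PySem.List.pyGetD nums high 0
  let st := (PySem.List.pyRange low (high + 1) 1).foldl (pvPartStep pivot) (nums, low)
  (PySem.List.pySetD (PySem.List.pySetD st.1 st.2 pivot) high (PySem.List.pyGetD st.1 st.2 0), st.2)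

-- A's `while i_pivot != i_intended` loop, ported with fuel (the initial `i_pivot = None` makes the
-- body run at least once, which the recursion does as well since it tests only after partitioning);
-- under Pre_ the search interval shrinks every iteration, so fuel = len(nums_unique) never runs out.
def pvSelectLoop : Nat → List Int → Int → Int → Int → List Int × Int
  | 0, l, _, _, _ => (l, 0)
  | fuel + 1, l, iInt, low, high =>
    let r := pvPartition l low high
    if r.2 < iInt then pvSelectLoop fuel r.1 iInt (r.2 + 1) high
    else if r.2 > iInt then pvSelectLoop fuel r.1 iInt low (r.2 - 1)
    else r

def find_largest_k_elements (nums : List Int) (k : Int) : List Int :=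
  let numsUnique := PySem.Set.ofList nums
  let n : Int := PySem.List.len numsUnique
  let iIntended := n - k
  if iIntended ≤ 0 then nums
  else
    let r := pvSelectLoop numsUnique.length numsUnique iIntended 0 (n - 1)
    nums.filter (fun x => decide (PySem.List.pyGetD r.1 r.2 0 ≤ x))

-- ===== PORT B =====
def find_largest_k_elements_alt (nums : List Int) (k : Int) : List Int :=
  let uniqueSorted := PySem.List.sorted (PySem.Set.ofList nums) (fun x => x) false
  let i := PySem.List.len uniqueSorted - k
  if i ≤ 0 then nums
  else
    let threshold := PySem.List.pyGetD uniqueSorted i 0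
    nums.filter (fun x => decide (threshold ≤ x))

-- ===== PRECONDITION & SPEC =====
-- Pre_ excludes exactly the inputs on which A raises IndexError (k ≤ 0 while nums has at least one
-- distinct value, or a negative k on empty nums); B raises IndexError on the same inputs.
def Pre_find_largest_k_elements (nums : List Int) (k : Int) : Prop :=
  1 ≤ k ∨ ((PySem.Set.ofList nums).length : Int) ≤ k
instance (nums : List Int) (k : Int) : Decidable (Pre_find_largest_k_elements nums k) := by
  unfold Pre_find_largest_k_elements; infer_instance
def pvWitness_find_largest_k_elements : List Int × Int := ([3, 1, 2, 1], 2)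

def Spec_find_largest_k_elements (nums : List Int) (k : Int) (out : List Int) : Prop := out = find_largest_k_elements_alt nums k
instance (nums : List Int) (k : Int) (out : List Int) : Decidable (Spec_find_largest_k_elements nums k out) := by unfold Spec_find_largest_k_elements; infer_instance

-- ===== CLAIM (what is proved, stated in full; the proofs are below) =====
def Claim_equal_find_largest_k_elements : Prop := ∀ (nums : List Int) (k : Int), Dom_find_largest_k_elements nums k → Pre_find_largest_k_elements nums k → Spec_find_largest_k_elements nums k (find_largest_k_elements nums k)

-- ===== LEMMAS AND PROOFS =====

-- getD after set, in one formula
theorem pvGetD_set (l : List Int) (m j : Nat) (v : Int) :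
    (l.set m v).getD j 0 = if m = j ∧ j < l.length then v else l.getD j 0 := by
  by_cases hj : j < l.length
  · by_cases hm : m = j <;> simp [List.getD_eq_getElem?_getD, hj, hm]
  · rw [List.getD_eq_default _ _ (by omega : l.length ≤ j),
      List.getD_eq_default _ _ (by rw [List.length_set]; omega : (l.set m v).length ≤ j),
      if_neg (by omega)]

theorem pvGetD_mem (l : List Int) (j : Nat) (h : j < l.length) : l.getD j 0 ∈ l := by
  rw [List.getD_eq_getElem l 0 h]; exact List.getElem_mem h

theorem pvMem_getD (l : List Int) (v : Int) (h : v ∈ l) :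
    ∃ j, j < l.length ∧ l.getD j 0 = v := by
  obtain ⟨j, hj, e⟩ := List.mem_iff_getElem.mp h
  exact ⟨j, hj, by rw [List.getD_eq_getElem l 0 hj]; exact e⟩

theorem pvNodup_getD_ne (l : List Int) (hl : l.Nodup) (a b : Nat)
    (ha : a < l.length) (hb : b < l.length) (hne : a ≠ b) : l.getD a 0 ≠ l.getD b 0 := by
  rw [List.getD_eq_getElem l 0 ha, List.getD_eq_getElem l 0 hb]
  exact fun e => hne (List.Nodup.getElem_inj_iff hl |>.mp e)

-- replacing position m by h and prepending the removed value is a permutation of h :: t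
theorem pvSetPerm (t : List Int) (m : Nat) (h : Int) (hm : m < t.length) :
    (t.getD m 0 :: t.set m h).Perm (h :: t) := by
  induction t generalizing m with
  | nil => simp at hm
  | cons x t ih =>
    cases m with
    | zero => simpa using List.Perm.swap h x t
    | succ m =>
      have hm' : m < t.length := by simpa using hm
      have h1 : (t.getD m 0 :: x :: t.set m h).Perm (x :: t.getD m 0 :: t.set m h) :=
        List.Perm.swap _ _ _
      have h2 : (x :: t.getD m 0 :: t.set m h).Perm (x :: h :: t) := List.Perm.cons x (ih m hm')
      have h3 : (x :: h :: t).Perm (h :: x :: t) := List.Perm.swap h x t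
      simpa [List.getD_cons_succ] using (h1.trans h2).trans h3

-- swapping two positions is a permutation
theorem pvSwapPerm (l : List Int) (a b : Nat) (ha : a < l.length) (hb : b < l.length) :
    ((l.set b (l.getD a 0)).set a (l.getD b 0)).Perm l := by
  induction l generalizing a b with
  | nil => simp at ha
  | cons x t ih =>
    cases a with
    | zero =>
      cases b with
      | zero => simp
      | succ m =>
        have hm : m < t.length := by simpa using hb
        simpa [List.getD_cons_succ] using pvSetPerm t m x hm
    | succ j =>
      cases b with
      | zero =>
        have hj : j < t.length := by simpa using ha
        simpa [List.getD_cons_succ] using pvSetPerm t j x hj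
      | succ m =>
        have hj : j < t.length := by simpa using ha
        have hm : m < t.length := by simpa using hb
        simpa [List.getD_cons_succ] using List.Perm.cons x (ih j m hj hm)

theorem pvPermMiddle (x s y s1 : List Int) (h : (x ++ s ++ y).Perm (x ++ s1 ++ y)) : s.Perm s1 := by
  have h2 := (List.perm_append_left_iff (l₁ := s ++ y) (l₂ := s1 ++ y) x).mp
    (by simpa [List.append_assoc] using h)
  exact (List.perm_append_right_iff y).mp h2

-- a value inside the worked-on segment of l1 is a value of l0 inside the same segment
theorem pvSegValues (l0 l1 : List Int) (low high b : Nat)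
    (hlen : l1.length = l0.length) (hperm : l1.Perm l0)
    (hout : ∀ j : Nat, j < l0.length → (j < low ∨ high < j) → l1.getD j 0 = l0.getD j 0)
    (hlb : low ≤ b) (hbh : b ≤ high) (hh : high < l0.length) :
    ∃ b', low ≤ b' ∧ b' ≤ high ∧ l1.getD b 0 = l0.getD b' 0 := by
  have hpre : l1.take low = l0.take low := by
    apply List.ext_getElem (by simp [hlen])
    intro i h1 h2
    have hi : i < low := by simp at h1; omega
    have hil : i < l0.length := by simp at h2; omega
    rw [List.getElem_take, List.getElem_take]
    have := hout i hil (Or.inl hi)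
    rwa [List.getD_eq_getElem l1 0 (by omega), List.getD_eq_getElem l0 0 hil] at this
  have hsuf : l1.drop (high + 1) = l0.drop (high + 1) := by
    apply List.ext_getElem (by simp [hlen])
    intro i h1 h2
    rw [List.getElem_drop, List.getElem_drop]
    have hil : high + 1 + i < l0.length := by simp at h2; omega
    have := hout (high + 1 + i) hil (Or.inr (by omega))
    rwa [List.getD_eq_getElem l1 0 (by omega), List.getD_eq_getElem l0 0 hil] at this
  have hdec : ∀ (l : List Int),
      l = l.take low ++ ((l.drop low).take (high + 1 - low)) ++ l.drop (high + 1) := by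
    intro l
    conv_lhs => rw [← List.take_append_drop low l]
    rw [List.append_assoc]
    congr 1
    conv_lhs => rw [← List.take_append_drop (high + 1 - low) (l.drop low)]
    rw [List.drop_drop]
    congr 2
    omega
  have hmidperm : ((l1.drop low).take (high + 1 - low)).Perm ((l0.drop low).take (high + 1 - low)) := by
    apply pvPermMiddle (l0.take low) _ (l0.drop (high + 1))
    have e1 : l0.take low ++ (l1.drop low).take (high + 1 - low) ++ l0.drop (high + 1) = l1 := by
      rw [← hpre, ← hsuf, ← hdec l1]
    rw [e1, ← hdec l0]
    exact hperm
  have hb1 : b < l1.length := by omega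
  have hmem : l1.getD b 0 ∈ (l1.drop low).take (high + 1 - low) := by
    have hblen : b - low < ((l1.drop low).take (high + 1 - low)).length := by
      simp [List.length_take, List.length_drop, hlen]; omega
    have : ((l1.drop low).take (high + 1 - low)).getD (b - low) 0 = l1.getD b 0 := by
      rw [List.getD_eq_getElem _ 0 hblen, List.getElem_take, List.getElem_drop,
        List.getD_eq_getElem l1 0 (by omega)]
      congr 1
      omega
    rw [← this]
    exact pvGetD_mem _ _ hblen
  have hmem0 : l1.getD b 0 ∈ (l0.drop low).take (high + 1 - low) := hmidperm.mem_iff.mp hmem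
  obtain ⟨j, hj, e⟩ := pvMem_getD _ _ hmem0
  have hjlen : j < high + 1 - low := by
    simp [List.length_take, List.length_drop] at hj; omega
  refine ⟨low + j, by omega, by omega, ?_⟩
  rw [← e, List.getD_eq_getElem _ 0 hj, List.getElem_take, List.getElem_drop,
    List.getD_eq_getElem l0 0 (by omega)]

-- positional description of a predicate fixes the filter's length
theorem pvPosFilter (l : List Int) (p : Int → Bool) (i : Nat) (hi : i ≤ l.length)
    (ht : ∀ j, j < i → p (l.getD j 0) = true)
    (hf : ∀ j, i ≤ j → j < l.length → p (l.getD j 0) = false) :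
    (l.filter p).length = i := by
  induction l generalizing i with
  | nil =>
    simp only [List.filter_nil, List.length_nil]
    simp at hi
    omega
  | cons x t ih =>
    cases i with
    | zero =>
      have h0 : p x = false := by simpa using hf 0 (by omega) (by simp)
      have : (t.filter p).length = 0 := ih 0 (by omega) (by omega)
        (fun j _ hj => by simpa using hf (j + 1) (by omega) (by simpa using hj))
      simp [h0, this]
    | succ i =>
      have h0 : p x = true := by simpa using ht 0 (by omega)
      have : (t.filter p).length = i := ih i (by simpa using hi)
        (fun j hj => by simpa using ht (j + 1) (by omega))
        (fun j hj hj2 => by simpa using hf (j + 1) (by omega) (by simpa using hj2))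
      simp [h0, this]

-- in a strictly increasing list, the element with i smaller members sits at index i
theorem pvSortedRank (s : List Int) (v : Int) (i : Nat)
    (hs : s.Pairwise (· < ·)) (hv : v ∈ s)
    (hlen : (s.filter (fun x => decide (x < v))).length = i) (hi : i < s.length) :
    s.getD i 0 = v := by
  induction s generalizing i with
  | nil => simp at hv
  | cons x t ih =>
    have hx : ∀ y ∈ t, x < y := (List.pairwise_cons.mp hs).1
    by_cases hvx : v = x
    · subst hvx
      have hnil : t.filter (fun x => decide (x < v)) = [] := by
        rw [List.filter_eq_nil_iff]
        intro y hy
        have := hx y hy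
        simp; omega
      rw [List.filter_cons] at hlen
      simp only [decide_eq_true_eq] at hlen
      rw [if_neg (by omega), hnil] at hlen
      simp at hlen
      simp [← hlen]
    · have hvt : v ∈ t := by rcases List.mem_cons.mp hv with h | h; exact absurd h hvx; exact h
      have hxv : x < v := hx v hvt
      rw [List.filter_cons] at hlen
      rw [if_pos (by simpa using hxv)] at hlen
      simp only [List.length_cons] at hlen
      cases i with
      | zero => omega
      | succ i =>
        have hl : (t.filter (fun x => decide (x < v))).length = i := by omega
        simpa [List.getD_cons_succ] using
          ih i ((List.pairwise_cons.mp hs).2) hvt hl (by simpa using hi)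

-- invariant of A's partition loop, over the original list l0 and pivot p
def PartInv (l0 : List Int) (p : Int) (low : Nat) (st : List Int × Int) (a : Nat) : Prop :=
  ∃ iN : Nat, st.2 = (iN : Int) ∧ low ≤ iN ∧ iN ≤ a ∧
    st.1.length = l0.length ∧ st.1.Perm l0 ∧
    (∀ j : Nat, j < l0.length → (j < low ∨ a ≤ j) → st.1.getD j 0 = l0.getD j 0) ∧
    (∀ j : Nat, low ≤ j → j < iN → st.1.getD j 0 < p) ∧
    (∀ j : Nat, iN ≤ j → j < a → ¬ st.1.getD j 0 < p)

theorem pvPartStepInv (l0 : List Int) (p : Int) (low a : Nat) (st : List Int × Int)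
    (hInv : PartInv l0 p low st a) (ha : a < l0.length) :
    PartInv l0 p low (pvPartStep p st (a : Int)) (a + 1) := by
  obtain ⟨iN, hsnd, hlowi, hia, hlen, hperm, hout, hlt, hge⟩ := hInv
  have hga : PySem.List.pyGetD st.1 (a : Int) 0 = st.1.getD a 0 := PySem.List.pyGetD_natCast ..
  by_cases hc : st.1.getD a 0 < p
  · have hstep : pvPartStep p st (a : Int) =
        ((st.1.set iN (st.1.getD a 0)).set a (st.1.getD iN 0), ((iN + 1 : Nat) : Int)) := by
      unfold pvPartStep
      rw [hga, if_pos hc, hsnd]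
      rw [PySem.List.pySetD_natCast, PySem.List.pySetD_natCast, PySem.List.pyGetD_natCast]
      push_cast
      rfl
    rw [hstep]
    have hal : a < st.1.length := by omega
    have hbl : iN < st.1.length := by omega
    refine ⟨iN + 1, rfl, by omega, by omega, by simp [hlen], ?_, ?_, ?_, ?_⟩
    · exact (pvSwapPerm st.1 a iN hal hbl).trans hperm
    · intro j hj hout'
      rw [pvGetD_set, pvGetD_set]
      rcases hout' with h' | h'
      · rw [if_neg (by rintro ⟨h1, _⟩; omega), if_neg (by rintro ⟨h1, _⟩; omega)]
        exact hout j hj (by omega)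
      · rw [if_neg (by rintro ⟨h1, _⟩; omega), if_neg (by rintro ⟨h1, _⟩; omega)]
        exact hout j hj (by omega)
    · intro j hjlow hj
      rw [pvGetD_set, pvGetD_set]
      by_cases hja : a = j
      · rw [if_pos ⟨hja, by rw [List.length_set]; omega⟩]
        have : iN = a := by omega
        rw [this]; exact hc
      · rw [if_neg (by rintro ⟨h1, _⟩; omega)]
        by_cases hji : iN = j
        · rw [if_pos ⟨hji, by omega⟩]; exact hc
        · rw [if_neg (by rintro ⟨h1, _⟩; omega)]
          exact hlt j hjlow (by omega)
    · intro j hj hja1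
      rw [pvGetD_set, pvGetD_set]
      by_cases hja : a = j
      · rw [if_pos ⟨hja, by rw [List.length_set]; omega⟩]
        exact hge iN (le_refl _) (by omega)
      · rw [if_neg (by rintro ⟨h1, _⟩; omega), if_neg (by rintro ⟨h1, _⟩; omega)]
        exact hge j (by omega) (by omega)
  · have hstep : pvPartStep p st (a : Int) = st := by
      unfold pvPartStep
      rw [hga, if_neg hc]
    rw [hstep]
    refine ⟨iN, hsnd, hlowi, by omega, hlen, hperm, ?_, hlt, ?_⟩
    · intro j hj hout'
      exact hout j hj (by omega)
    · intro j hji hja1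
      by_cases hja : j = a
      · rw [hja]; exact hc
      · exact hge j hji (by omega)

theorem pvPartFoldInv (l0 : List Int) (p : Int) (low : Nat) :
    ∀ (c a : Nat) (st : List Int × Int), PartInv l0 p low st a → a + c ≤ l0.length →
    PartInv l0 p low
      ((PySem.List.pyRange (a : Int) ((a : Int) + (c : Int)) 1).foldl (pvPartStep p) st) (a + c) := by
  intro c
  induction c with
  | zero =>
    intro a st hInv _
    rw [PySem.List.pyRange_one_eq_nil (by omega)]
    simpa using hInv
  | succ c ih =>
    intro a st hInv hle
    rw [PySem.List.pyRange_one_cons (by push_cast; omega)]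
    rw [List.foldl_cons]
    have h1 := pvPartStepInv l0 p low a st hInv (by omega)
    have h2 := ih (a + 1) (pvPartStep p st (a : Int)) h1 (by omega)
    have e1 : ((a : Int) + 1) = (((a + 1 : Nat)) : Int) := by push_cast; ring
    have e2 : ((a : Int) + ((c : Nat) + 1 : Nat)) = (((a + 1 : Nat)) : Int) + (c : Int) := by
      push_cast; ring
    rw [e2, e1]
    have e3 : a + (c + 1) = (a + 1) + c := by omega
    rw [e3]
    exact h2

theorem pvPartitionSpec (l0 : List Int) (low high : Nat) (hlh : low ≤ high) (hh : high < l0.length) :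
    ∃ (l1 : List Int) (ip : Nat),
      pvPartition l0 (low : Int) (high : Int) = (l1, (ip : Int)) ∧
      low ≤ ip ∧ ip ≤ high ∧ l1.Perm l0 ∧ l1.length = l0.length ∧
      (∀ j : Nat, j < l0.length → (j < low ∨ high < j) → l1.getD j 0 = l0.getD j 0) ∧
      l1.getD ip 0 = l0.getD high 0 ∧
      (∀ j : Nat, low ≤ j → j < ip → l1.getD j 0 < l0.getD high 0) ∧
      (∀ j : Nat, ip < j → j ≤ high → ¬ l1.getD j 0 < l0.getD high 0) := by
  have hp : PySem.List.pyGetD l0 (high : Int) 0 = l0.getD high 0 := PySem.List.pyGetD_natCast ..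
  set p := l0.getD high 0 with hpdef
  have hInit : PartInv l0 p low (l0, (low : Int)) low :=
    ⟨low, rfl, le_refl _, le_refl _, rfl, List.Perm.refl _, fun _ _ _ => rfl,
      fun j h1 h2 => by omega, fun j h1 h2 => by omega⟩
  have hFold := pvPartFoldInv l0 p low (high - low) low (l0, (low : Int)) hInit (by omega)
  set st1 := (PySem.List.pyRange (low : Int) ((low : Int) + ((high - low : Nat) : Int)) 1).foldl
      (pvPartStep p) (l0, (low : Int)) with hst1
  obtain ⟨iN, hsnd, hlowi, hia, hlen, hperm, hout, hlt, hge⟩ := hFold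
  have hia' : iN ≤ high := by omega
  have hsplit : PySem.List.pyRange (low : Int) ((high : Int) + 1) 1
      = PySem.List.pyRange (low : Int) ((low : Int) + ((high - low : Nat) : Int)) 1 ++ [(high : Int)] := by
    have e : ((low : Int) + ((high - low : Nat) : Int)) = (high : Int) := by omega
    rw [e, ← PySem.List.pyRange_one_singleton (high : Int)]
    exact PySem.List.pyRange_one_append _ _ _ (by omega) (by omega)
  have hhigh : st1.1.getD high 0 = p := hout high hh (Or.inr (by omega))
  have hlast : pvPartStep p st1 (high : Int) = st1 := by
    unfold pvPartStep
    rw [PySem.List.pyGetD_natCast, hhigh, if_neg (by omega)]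
  have hloop : (PySem.List.pyRange (low : Int) ((high : Int) + 1) 1).foldl (pvPartStep p)
      (l0, (low : Int)) = st1 := by
    rw [hsplit, List.foldl_append, ← hst1]
    simpa using hlast
  have hiNlen : iN < st1.1.length := by omega
  have hhlen : high < st1.1.length := by omega
  refine ⟨(st1.1.set iN p).set high (st1.1.getD iN 0), iN, ?_, hlowi, hia', ?_, ?_, ?_, ?_, ?_, ?_⟩
  · show pvPartition l0 (low : Int) (high : Int) = _
    unfold pvPartition
    simp only [hp, hloop, hsnd]
    rw [PySem.List.pySetD_natCast, PySem.List.pyGetD_natCast, PySem.List.pySetD_natCast]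
  · have := pvSwapPerm st1.1 high iN hhlen hiNlen
    rw [hhigh] at this
    exact this.trans hperm
  · simp [hlen]
  · intro j hj hrange
    rw [pvGetD_set, pvGetD_set]
    rcases hrange with h' | h'
    · rw [if_neg (by rintro ⟨h1, _⟩; omega), if_neg (by rintro ⟨h1, _⟩; omega)]
      exact hout j hj (Or.inl h')
    · rw [if_neg (by rintro ⟨h1, _⟩; omega), if_neg (by rintro ⟨h1, _⟩; omega)]
      exact hout j hj (Or.inr (by omega))
  · rw [pvGetD_set, pvGetD_set]
    by_cases hiNh : iN = high
    · rw [if_pos ⟨hiNh.symm, by rw [List.length_set]; omega⟩, hiNh]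
      exact hhigh
    · rw [if_neg (by rintro ⟨h1, _⟩; omega), if_pos ⟨rfl, by omega⟩]
  · intro j hjl hji
    rw [pvGetD_set, pvGetD_set]
    rw [if_neg (by rintro ⟨h1, _⟩; omega), if_neg (by rintro ⟨h1, _⟩; omega)]
    exact hlt j hjl hji
  · intro j hji hjh
    rw [pvGetD_set]
    by_cases hjhigh : j = high
    · rw [if_pos ⟨hjhigh.symm, by rw [List.length_set]; omega⟩]
      exact hge iN (le_refl _) (by omega)
    · rw [if_neg (by rintro ⟨h1, _⟩; omega), pvGetD_set, if_neg (by rintro ⟨h1, _⟩; omega)]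
      exact hge j (by omega) (by omega)

theorem pvSelectSpec (iN : Nat) :
    ∀ (fuel : Nat) (l : List Int) (low high : Nat), l.Nodup →
    low ≤ iN → iN ≤ high → high < l.length →
    (∀ a b : Nat, a < low → low ≤ b → b < l.length → l.getD a 0 < l.getD b 0) →
    (∀ a b : Nat, b ≤ high → high < a → a < l.length → l.getD b 0 < l.getD a 0) →
    high - low < fuel →
    ∃ l', pvSelectLoop fuel l (iN : Int) (low : Int) (high : Int) = (l', (iN : Int)) ∧
      l'.Perm l ∧ l'.length = l.length ∧
      (∀ j : Nat, j < iN → l'.getD j 0 < l'.getD iN 0) ∧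
      (∀ j : Nat, iN < j → j < l.length → l'.getD iN 0 < l'.getD j 0) := by
  intro fuel
  induction fuel with
  | zero => intro l low high _ _ _ _ _ _ hfuel; omega
  | succ fuel ih =>
    intro l low high hnd hlowi hihigh hhl Hlo Hhi hfuel
    obtain ⟨l1, ip, heq, hlip, hiph, hperm, hlen, hout, hpiv, hlt, hnlt⟩ :=
      pvPartitionSpec l low high (by omega) hhl
    set p := l.getD high 0 with hpdef
    have hnd1 : l1.Nodup := hperm.nodup_iff.mpr hnd
    have hgt : ∀ j : Nat, ip < j → j ≤ high → p < l1.getD j 0 := by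
      intro j h1 h2
      have hne := pvNodup_getD_ne l1 hnd1 j ip (by omega) (by omega) (by omega)
      have := hnlt j h1 h2
      rw [hpiv] at hne
      omega
    have hSV : ∀ b : Nat, low ≤ b → b ≤ high →
        ∃ b', low ≤ b' ∧ b' ≤ high ∧ l1.getD b 0 = l.getD b' 0 :=
      fun b h1 h2 => pvSegValues l l1 low high b hlen hperm hout h1 h2 hhl
    unfold pvSelectLoop
    rw [heq]
    simp only
    by_cases hc1 : ip < iN
    · rw [if_pos (by exact_mod_cast hc1)]
      have hrec := ih l1 (ip + 1) high hnd1 (by omega) hihigh (by omega) ?_ ?_ (by omega)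
      · obtain ⟨l2, heq2, hperm2, hlen2, hA, hB⟩ := hrec
        refine ⟨l2, ?_, hperm2.trans hperm, by omega, hA, fun j h1 h2 => hB j h1 (by omega)⟩
        have e : ((ip : Int) + 1) = (((ip + 1 : Nat)) : Int) := by push_cast; ring
        rw [e]
        exact heq2
      · -- new lower boundary invariant
        intro a b ha hb hbl
        by_cases halow : a < low
        · have hva : l1.getD a 0 = l.getD a 0 := hout a (by omega) (Or.inl halow)
          by_cases hbh : b ≤ high
          · obtain ⟨b', hb1, hb2, hbe⟩ := hSV b (by omega) hbh
            rw [hva, hbe]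
            exact Hlo a b' halow (by omega) (by omega)
          · have hvb : l1.getD b 0 = l.getD b 0 := hout b (by omega) (Or.inr (by omega))
            rw [hva, hvb]
            exact Hlo a b halow (by omega) (by omega)
        · have hale : l1.getD a 0 ≤ p := by
            by_cases haip : a < ip
            · exact le_of_lt (hlt a (by omega) haip)
            · have : a = ip := by omega
              rw [this, hpiv]
          by_cases hbh : b ≤ high
          · have := hgt b (by omega) hbh
            omega
          · have hvb : l1.getD b 0 = l.getD b 0 := hout b (by omega) (Or.inr (by omega))
            obtain ⟨a', ha1, ha2, hae⟩ := hSV a (by omega) (by omega)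
            rw [hae, hvb]
            exact Hhi b a' ha2 (by omega) (by omega)
      · -- upper boundary invariant unchanged
        intro a b hbh hha hal
        have hva : l1.getD a 0 = l.getD a 0 := hout a (by omega) (Or.inr (by omega))
        by_cases hblow : b < low
        · have hvb : l1.getD b 0 = l.getD b 0 := hout b (by omega) (Or.inl hblow)
          rw [hvb, hva]
          exact Hhi a b hbh hha (by omega)
        · obtain ⟨b', hb1, hb2, hbe⟩ := hSV b (by omega) hbh
          rw [hbe, hva]
          exact Hhi a b' hb2 hha (by omega)
    · rw [if_neg (by omega)]
      by_cases hc2 : ip > iN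
      · rw [if_pos (by exact_mod_cast hc2)]
        have hrec := ih l1 low (ip - 1) hnd1 hlowi (by omega) (by omega) ?_ ?_ (by omega)
        · obtain ⟨l2, heq2, hperm2, hlen2, hA, hB⟩ := hrec
          refine ⟨l2, ?_, hperm2.trans hperm, by omega, hA, fun j h1 h2 => hB j h1 (by omega)⟩
          have e : ((ip : Int) - 1) = (((ip - 1 : Nat)) : Int) := by
            push_cast [Nat.cast_sub (by omega : 1 ≤ ip)]; ring
          rw [e]
          exact heq2
        · intro a b ha hb hbl
          have hva : l1.getD a 0 = l.getD a 0 := hout a (by omega) (Or.inl ha)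
          by_cases hbh : b ≤ high
          · obtain ⟨b', hb1, hb2, hbe⟩ := hSV b hb hbh
            rw [hva, hbe]
            exact Hlo a b' ha (by omega) (by omega)
          · have hvb : l1.getD b 0 = l.getD b 0 := hout b (by omega) (Or.inr (by omega))
            rw [hva, hvb]
            exact Hlo a b ha hb (by omega)
        · intro a b hbip hipa hal
          have hpa : p ≤ l1.getD a 0 := by
            by_cases hah : a ≤ high
            · by_cases haip : a = ip
              · rw [haip, hpiv]
              · exact le_of_lt (hgt a (by omega) hah)
            · have hva : l1.getD a 0 = l.getD a 0 := hout a (by omega) (Or.inr (by omega))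
              rw [hva]
              exact le_of_lt (Hhi a high (le_refl _) (by omega) (by omega))
          have hblt : l1.getD b 0 < p := by
            by_cases hblow : b < low
            · have hvb : l1.getD b 0 = l.getD b 0 := hout b (by omega) (Or.inl hblow)
              rw [hvb, hpdef]
              exact Hlo b high hblow (by omega) (by omega)
            · exact hlt b (by omega) (by omega)
          omega
      · have hip : ip = iN := by omega
        rw [if_neg (by omega)]
        subst hip
        refine ⟨l1, rfl, hperm, hlen, ?_, ?_⟩
        · intro j hj
          rw [hpiv]
          by_cases hjlow : j < low
          · have hvj : l1.getD j 0 = l.getD j 0 := hout j (by omega) (Or.inl hjlow)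
            rw [hvj, hpdef]
            exact Hlo j high hjlow (by omega) (by omega)
          · exact hlt j (by omega) hj
        · intro j h1 h2
          rw [hpiv]
          by_cases hjh : j ≤ high
          · exact hgt j h1 hjh
          · have hvj : l1.getD j 0 = l.getD j 0 := hout j (by omega) (Or.inr (by omega))
            rw [hvj, hpdef]
            exact Hhi j high (le_refl _) (by omega) (by omega)

theorem pvMainEq (nums : List Int) (k : Int) (hpre : Pre_find_largest_k_elements nums k) :
    find_largest_k_elements nums k = find_largest_k_elements_alt nums k := by
  unfold Pre_find_largest_k_elements at hpre
  simp only [find_largest_k_elements, find_largest_k_elements_alt,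
    PySem.List.len_eq, PySem.List.length_sorted]
  by_cases hc : ((PySem.Set.ofList nums).length : Int) - k ≤ 0
  · rw [if_pos hc, if_pos hc]
  · rw [if_neg hc, if_neg hc]
    have hk1 : 1 ≤ k := by rcases hpre with h | h <;> omega
    set u := PySem.Set.ofList nums with hu
    set n := u.length with hn
    set iN : Nat := ((n : Int) - k).toNat with hiN
    have hiNcast : ((n : Int) - k) = (iN : Int) := by omega
    have hiNlt : iN ≤ n - 1 := by omega
    have hn1 : 1 ≤ n := by omega
    have hnd : u.Nodup := PySem.Set.nodup_ofList nums
    obtain ⟨l', heq, hperm, hlen, hA, hB⟩ :=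
      pvSelectSpec iN n u 0 (n - 1) hnd (by omega) hiNlt (by omega)
        (fun a b ha _ _ => by omega)
        (fun a b hb ha hal => by omega)
        (by omega)
    have heq2 : pvSelectLoop (List.length u) u ((List.length u : Int) - k) 0
        ((List.length u : Int) - 1) = (l', (iN : Int)) := by
      have e1 : ((List.length u : Int)) = (n : Int) := by rw [hn]
      rw [e1, hiNcast, (by omega : ((n : Int) - 1) = (((n - 1 : Nat)) : Int))]
      exact_mod_cast heq
    simp only [heq2]
    set v := l'.getD iN 0 with hv
    have hgv : PySem.List.pyGetD l' ((iN : Nat) : Int) 0 = v := PySem.List.pyGetD_natCast ..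
    set s := PySem.List.sorted u (fun x => x) false with hs
    have hiNl' : iN < l'.length := by omega
    have hslen : s.length = n := PySem.List.length_sorted ..
    have hsp : s.Pairwise (· < ·) := PySem.List.sorted_ofList_pairwise_lt nums
    have hvs : v ∈ s := by
      rw [hs, PySem.List.mem_sorted]
      exact hperm.mem_iff.mp (pvGetD_mem l' iN hiNl')
    have hfl' : (l'.filter (fun x => decide (x < v))).length = iN :=
      pvPosFilter l' _ iN (by omega)
        (fun j hj => decide_eq_true (by have := hA j hj; omega))
        (fun j h1 h2 => by
          by_cases hji : j = iN
          · rw [hji, ← hv]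
            exact decide_eq_false (lt_irrefl v)
          · exact decide_eq_false (by have := hB j (by omega) (by omega); omega))
    have hfs : (s.filter (fun x => decide (x < v))).length = iN := by
      have hps : s.Perm l' := (PySem.List.sorted_perm ..).trans hperm.symm
      rw [← hfl']
      exact (hps.filter _).length_eq
    have hrank : s.getD iN 0 = v := pvSortedRank s v iN hsp hvs hfs (by omega)
    have hgs2 : PySem.List.pyGetD s ((List.length u : Int) - k) 0 = s.getD iN 0 := by
      have e1 : ((List.length u : Int)) = (n : Int) := by rw [hn]
      rw [e1, hiNcast]
      exact PySem.List.pyGetD_natCast ..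
    simp only [hgv, hgs2, hrank]

-- ===== VERDICT (by name: the statement is the Claim_ definition above) =====
theorem find_largest_k_elements_spec : Claim_equal_find_largest_k_elements := by
  intro nums k _ hpre
  unfold Spec_find_largest_k_elements
  exact pvMainEq nums k hpre
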